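-- pv_equiv track=rewrite | github.com/Parham-Mehrabi/passlist_generator | combiners.py | tarkib
-- ===== SOURCE A (Python) =====
-- def tarkib(depths,deraza,passw_list,dinamit):
--     if depths > 1:
--         for i in range(deraza):
--             for j in range(deraza):
--                 passw_list.append(f'{dinamit[i]}-{dinamit[j]}')
--                 passw_list.append(f'{dinamit[i]}{dinamit[j]}')
--     if depths > 2:
--         for i in range(deraza):
--             for j in range(deraza):
--                 for g in range(deraza):
--                     passw_list.append(f'{dinamit[i]}-{dinamit[j]}-{dinamit[g]}')
--                     passw_list.append(f'{dinamit[i]}{dinamit[j]}{dinamit[g]}')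
--     if depths > 3:
--         for i in range(deraza):
--             for j in range(deraza):
--                 for g in range(deraza):
--                     for g2 in range(deraza):
--                         passw_list.append(f'{dinamit[i]}-{dinamit[j]}-{dinamit[g]}-{dinamit[g2]}')
--                         passw_list.append(f'{dinamit[i]}{dinamit[j]}{dinamit[g]}{dinamit[g2]}')
--     if depths > 4:
--         for i in range(deraza):
--             for j in range(deraza):
--                 for g in range(deraza):
--                     for g2 in range(deraza):
--                         for g3 in range(deraza):
--                             passw_list.append(f'{dinamit[i]}-{dinamit[j]}-{dinamit[g]}-{dinamit[g2]}-{dinamit[g3]}')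
--                             passw_list.append(f'{dinamit[i]}{dinamit[j]}{dinamit[g]}{dinamit[g2]}{dinamit[g3]}')
--     return passw_list
-- ===== SOURCE B (Python) =====
-- def tarkib(depths, deraza, passw_list, dinamit):
--     # One parametric loop over combination length n (2..min(depths,5)) with a
--     # recursive builder, instead of four hardcoded nested-loop blocks.
--     # Like A, this appends to passw_list in place and returns it.
--     def emit(n):
--         # all (dashed, plain) pairs for index tuples of length n, rightmost fastest
--         if n == 1:
--             return [(dinamit[k], dinamit[k]) for k in range(deraza)]
--         return [(dinamit[k] + '-' + d, dinamit[k] + p)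
--                 for k in range(deraza) for (d, p) in emit(n - 1)]
--     for n in range(2, min(depths, 5) + 1):
--         for d, p in emit(n):
--             passw_list.append(d)
--             passw_list.append(p)
--     return passw_list
-- ===== Notes on version B (the rewrite author's own statement) =====
-- stated objective: simpler
-- what changed: Replaces the four hardcoded fixed-depth nested-loop blocks with one parametric loop over combination length n from 2 to min(depths,5), using a recursive builder that produces the (dashed, concatenated) pairs for each length in the same emission order.
import Mathlib
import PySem

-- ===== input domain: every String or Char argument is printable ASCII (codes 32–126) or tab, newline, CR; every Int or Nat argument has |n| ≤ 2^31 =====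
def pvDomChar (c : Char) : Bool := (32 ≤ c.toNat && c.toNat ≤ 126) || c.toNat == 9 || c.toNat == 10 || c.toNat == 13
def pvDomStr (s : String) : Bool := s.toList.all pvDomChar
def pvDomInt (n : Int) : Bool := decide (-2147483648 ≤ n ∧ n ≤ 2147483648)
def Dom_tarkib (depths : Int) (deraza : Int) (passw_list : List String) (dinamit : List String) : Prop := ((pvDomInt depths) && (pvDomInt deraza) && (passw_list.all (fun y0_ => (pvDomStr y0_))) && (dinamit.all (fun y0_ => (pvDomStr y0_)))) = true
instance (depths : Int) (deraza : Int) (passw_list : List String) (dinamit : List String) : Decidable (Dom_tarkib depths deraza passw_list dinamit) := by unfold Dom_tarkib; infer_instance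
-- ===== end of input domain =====

-- B replaces A's four hardcoded nested-loop blocks by one loop over combination
-- length n = 2..min(depths,5) with a recursive pair builder (objective: simpler).
-- Both A and B append to passw_list in place and return it (same mutation).


-- ===== PORT A =====
-- dinamit[i]; Python raises IndexError where pyGet? is none — those inputs are outside Pre_tarkib
def pvGet (dinamit : List String) (i : Int) : String :=
  (PySem.List.pyGet? dinamit i).getD ""

-- Loop body of A. Guarded by tarkib below so evaluation stays total and fast where Python raises.
def tarkibCore (depths : Int) (deraza : Int) (passw_list : List String) (dinamit : List String) : List String :=
  let r := PySem.List.pyRange 0 deraza 1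
  let g := pvGet dinamit
  let p1 := if depths > 1 then
      r.foldl (fun a i => r.foldl (fun a j =>
        a ++ [g i ++ "-" ++ g j, g i ++ g j]) a) passw_list
    else passw_list
  let p2 := if depths > 2 then
      r.foldl (fun a i => r.foldl (fun a j => r.foldl (fun a k =>
        a ++ [g i ++ "-" ++ g j ++ "-" ++ g k, g i ++ g j ++ g k]) a) a) p1
    else p1
  let p3 := if depths > 3 then
      r.foldl (fun a i => r.foldl (fun a j => r.foldl (fun a k => r.foldl (fun a k2 =>
        a ++ [g i ++ "-" ++ g j ++ "-" ++ g k ++ "-" ++ g k2, g i ++ g j ++ g k ++ g k2]) a) a) a) p2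
    else p2
  let p4 := if depths > 4 then
      r.foldl (fun a i => r.foldl (fun a j => r.foldl (fun a k => r.foldl (fun a k2 => r.foldl (fun a k3 =>
        a ++ [g i ++ "-" ++ g j ++ "-" ++ g k ++ "-" ++ g k2 ++ "-" ++ g k3, g i ++ g j ++ g k ++ g k2 ++ g k3]) a) a) a) a) p3
    else p3
  p4

-- index-in-range guard only: when deraza > len(dinamit) Python A raises IndexError if depths > 1
-- (outside Pre_) and appends nothing if depths ≤ 1 — in both cases passw_list is value-correct inside Pre_.
def tarkib (depths : Int) (deraza : Int) (passw_list : List String) (dinamit : List String) : List String :=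
  if deraza ≤ (dinamit.length : Int) then tarkibCore depths deraza passw_list dinamit
  else passw_list

-- ===== PORT B =====
-- B's recursive helper emit(n): all (dashed, concatenated) pairs for index tuples of length n
def pvEmit (deraza : Int) (dinamit : List String) : Nat → List (String × String)
  | 0 => []
  | 1 => (PySem.List.pyRange 0 deraza 1).map (fun k => (pvGet dinamit k, pvGet dinamit k))
  | n + 2 => (PySem.List.pyRange 0 deraza 1).flatMap (fun k =>
      (pvEmit deraza dinamit (n + 1)).map
        (fun dp => (pvGet dinamit k ++ "-" ++ dp.1, pvGet dinamit k ++ dp.2)))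

def tarkibAltCore (depths : Int) (deraza : Int) (passw_list : List String) (dinamit : List String) : List String :=
  (PySem.List.pyRange 2 (min depths 5 + 1) 1).foldl (fun acc n =>
    (pvEmit deraza dinamit n.toNat).foldl (fun acc dp => acc ++ [dp.1, dp.2]) acc) passw_list

-- same index-in-range guard: B raises the same IndexError there (outside Pre_), appends nothing when depths ≤ 1
def tarkib_alt (depths : Int) (deraza : Int) (passw_list : List String) (dinamit : List String) : List String :=
  if deraza ≤ (dinamit.length : Int) then tarkibAltCore depths deraza passw_list dinamit
  else passw_list

-- ===== PRECONDITION & SPEC =====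
-- Pre_ excludes exactly the inputs where Python A raises IndexError: depths > 1 with
-- deraza exceeding len(dinamit) (B raises there too).
def Pre_tarkib (depths : Int) (deraza : Int) (passw_list : List String) (dinamit : List String) : Prop :=
  depths ≤ 1 ∨ deraza ≤ dinamit.length
instance (depths : Int) (deraza : Int) (passw_list : List String) (dinamit : List String) : Decidable (Pre_tarkib depths deraza passw_list dinamit) := by unfold Pre_tarkib; infer_instance

def pvWitness_tarkib : Int × Int × List String × List String := (3, 2, ["seed"], ["ab", "cd"])

def Spec_tarkib (depths : Int) (deraza : Int) (passw_list : List String) (dinamit : List String) (out : List String) : Prop := out = tarkib_alt depths deraza passw_list dinamit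
instance (depths : Int) (deraza : Int) (passw_list : List String) (dinamit : List String) (out : List String) : Decidable (Spec_tarkib depths deraza passw_list dinamit out) := by unfold Spec_tarkib; infer_instance

-- ===== CLAIM (what is proved, stated in full; the proofs are below) =====
def Claim_equal_tarkib : Prop := ∀ (depths : Int) (deraza : Int) (passw_list : List String) (dinamit : List String), Dom_tarkib depths deraza passw_list dinamit → Pre_tarkib depths deraza passw_list dinamit → Spec_tarkib depths deraza passw_list dinamit (tarkib depths deraza passw_list dinamit)

-- ===== LEMMAS AND PROOFS =====

theorem block2_eq (dz : Int) (dn P : List String) :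
    (PySem.List.pyRange 0 dz 1).foldl (fun a i => (PySem.List.pyRange 0 dz 1).foldl (fun a j =>
      a ++ [pvGet dn i ++ "-" ++ pvGet dn j, pvGet dn i ++ pvGet dn j]) a) P
    = (pvEmit dz dn 2).foldl (fun acc dp => acc ++ [dp.1, dp.2]) P := by
  simp only [pvEmit, PySem.List.foldl_append_eq_flatMap, List.flatMap_assoc, List.flatMap_map,
    String.append_assoc]

theorem block3_eq (dz : Int) (dn P : List String) :
    (PySem.List.pyRange 0 dz 1).foldl (fun a i => (PySem.List.pyRange 0 dz 1).foldl (fun a j =>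
      (PySem.List.pyRange 0 dz 1).foldl (fun a k =>
      a ++ [pvGet dn i ++ "-" ++ pvGet dn j ++ "-" ++ pvGet dn k,
            pvGet dn i ++ pvGet dn j ++ pvGet dn k]) a) a) P
    = (pvEmit dz dn 3).foldl (fun acc dp => acc ++ [dp.1, dp.2]) P := by
  simp only [pvEmit, PySem.List.foldl_append_eq_flatMap, List.flatMap_assoc, List.flatMap_map,
    String.append_assoc]

theorem block4_eq (dz : Int) (dn P : List String) :
    (PySem.List.pyRange 0 dz 1).foldl (fun a i => (PySem.List.pyRange 0 dz 1).foldl (fun a j =>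
      (PySem.List.pyRange 0 dz 1).foldl (fun a k => (PySem.List.pyRange 0 dz 1).foldl (fun a k2 =>
      a ++ [pvGet dn i ++ "-" ++ pvGet dn j ++ "-" ++ pvGet dn k ++ "-" ++ pvGet dn k2,
            pvGet dn i ++ pvGet dn j ++ pvGet dn k ++ pvGet dn k2]) a) a) a) P
    = (pvEmit dz dn 4).foldl (fun acc dp => acc ++ [dp.1, dp.2]) P := by
  simp only [pvEmit, PySem.List.foldl_append_eq_flatMap, List.flatMap_assoc, List.flatMap_map,
    String.append_assoc]

theorem block5_eq (dz : Int) (dn P : List String) :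
    (PySem.List.pyRange 0 dz 1).foldl (fun a i => (PySem.List.pyRange 0 dz 1).foldl (fun a j =>
      (PySem.List.pyRange 0 dz 1).foldl (fun a k => (PySem.List.pyRange 0 dz 1).foldl (fun a k2 =>
      (PySem.List.pyRange 0 dz 1).foldl (fun a k3 =>
      a ++ [pvGet dn i ++ "-" ++ pvGet dn j ++ "-" ++ pvGet dn k ++ "-" ++ pvGet dn k2 ++ "-" ++ pvGet dn k3,
            pvGet dn i ++ pvGet dn j ++ pvGet dn k ++ pvGet dn k2 ++ pvGet dn k3]) a) a) a) a) P
    = (pvEmit dz dn 5).foldl (fun acc dp => acc ++ [dp.1, dp.2]) P := by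
  simp only [pvEmit, PySem.List.foldl_append_eq_flatMap, List.flatMap_assoc, List.flatMap_map,
    String.append_assoc]

theorem alt_range_empty (depths dz : Int) (P dn : List String) (h : depths ≤ 1) :
    tarkibAltCore depths dz P dn = P := by
  have hmin : min depths 5 = depths := by omega
  have hz : (depths + 1 - 2).toNat = 0 := by omega
  simp [tarkibAltCore, hmin, PySem.List.pyRange_one, hz]

-- ===== VERDICT (by name: the statement is the Claim_ definition above) =====
theorem tarkib_spec : Claim_equal_tarkib := by
  intro depths dz P dn _ hpre
  unfold Spec_tarkib tarkib tarkib_alt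
  by_cases hg : dz ≤ (dn.length : Int)
  swap
  · rw [if_neg hg, if_neg hg]
  rw [if_pos hg, if_pos hg]
  by_cases h1 : depths ≤ 1
  · unfold tarkibCore
    simp only [eq_false (show ¬(depths > 1) by omega), eq_false (show ¬(depths > 2) by omega),
      eq_false (show ¬(depths > 3) by omega), eq_false (show ¬(depths > 4) by omega), if_false]
    exact (alt_range_empty depths dz P dn h1).symm
  · by_cases h2 : depths = 2
    · subst h2
      have hr : PySem.List.pyRange 2 (min (2:Int) 5 + 1) 1 = [2] := by decide
      unfold tarkibCore tarkibAltCore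
      rw [hr]
      simp only [List.foldl_cons, List.foldl_nil, show ((2:Int).toNat) = 2 from rfl,
        eq_true (show (2:Int) > 1 by norm_num), eq_false (show ¬((2:Int) > 2) by norm_num),
        eq_false (show ¬((2:Int) > 3) by norm_num), eq_false (show ¬((2:Int) > 4) by norm_num),
        if_true, if_false]
      rw [block2_eq]
    · by_cases h3 : depths = 3
      · subst h3
        have hr : PySem.List.pyRange 2 (min (3:Int) 5 + 1) 1 = [2, 3] := by decide
        unfold tarkibCore tarkibAltCore
        rw [hr]
        simp only [List.foldl_cons, List.foldl_nil, show ((2:Int).toNat) = 2 from rfl,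
          show ((3:Int).toNat) = 3 from rfl,
          eq_true (show (3:Int) > 1 by norm_num), eq_true (show (3:Int) > 2 by norm_num),
          eq_false (show ¬((3:Int) > 3) by norm_num), eq_false (show ¬((3:Int) > 4) by norm_num),
          if_true, if_false]
        rw [block2_eq, block3_eq]
      · by_cases h4 : depths = 4
        · subst h4
          have hr : PySem.List.pyRange 2 (min (4:Int) 5 + 1) 1 = [2, 3, 4] := by decide
          unfold tarkibCore tarkibAltCore
          rw [hr]
          simp only [List.foldl_cons, List.foldl_nil, show ((2:Int).toNat) = 2 from rfl,
            show ((3:Int).toNat) = 3 from rfl, show ((4:Int).toNat) = 4 from rfl,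
            eq_true (show (4:Int) > 1 by norm_num), eq_true (show (4:Int) > 2 by norm_num),
            eq_true (show (4:Int) > 3 by norm_num), eq_false (show ¬((4:Int) > 4) by norm_num),
            if_true, if_false]
          rw [block2_eq, block3_eq, block4_eq]
        · have hmin : min depths 5 = 5 := by omega
          have hr : PySem.List.pyRange 2 ((5:Int) + 1) 1 = [2, 3, 4, 5] := by decide
          unfold tarkibCore tarkibAltCore
          rw [hmin, hr]
          simp only [List.foldl_cons, List.foldl_nil, show ((2:Int).toNat) = 2 from rfl,
            show ((3:Int).toNat) = 3 from rfl, show ((4:Int).toNat) = 4 from rfl,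
            show ((5:Int).toNat) = 5 from rfl,
            eq_true (show depths > 1 by omega), eq_true (show depths > 2 by omega),
            eq_true (show depths > 3 by omega), eq_true (show depths > 4 by omega), if_true]
          rw [block2_eq, block3_eq, block4_eq, block5_eq]
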